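-- pv_equiv track=rewrite | github.com/Harito97/PythonAndScratch3Tutorial | ThiTinHocTre/Archived/2024_04_22/Ex1.py | process
-- ===== SOURCE A (Python) =====
-- def process(array: list[int]):
--     result = 0
--     for i in range(len(array)):
--         if i % 2 == 0:
--             sum_even = sum(array[j] for j in range(0, i, 2)) + sum(
--                 array[j] for j in range(i + 2, len(array), 2)
--             )
--             sum_odd = sum(array[j] for j in range(1, i, 2)) + sum(
--                 array[j] for j in range(i + 1, len(array), 2)
--             )
--         else:
--             sum_even = sum(array[j] for j in range(0, i, 2)) + sum(
--                 array[j] for j in range(i + 1, len(array), 2)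
--             )
--             sum_odd = sum(array[j] for j in range(1, i, 2)) + sum(
--                 array[j] for j in range(i + 2, len(array), 2)
--             )
--         if sum_even == sum_odd:
--             result += 1
--     return result
-- ===== SOURCE B (Python) =====
-- def process(array: list[int]):
--     even_total = 0
--     odd_total = 0
--     for i, x in enumerate(array):
--         if i % 2 == 0:
--             even_total += x
--         else:
--             odd_total += x
--     result = 0
--     for i, x in enumerate(array):
--         if (even_total - x == odd_total) if i % 2 == 0 else (even_total == odd_total - x):
--             result += 1
--     return result
-- ===== Notes on version B (the rewrite author's own statement) =====
-- stated objective: faster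
-- what changed: A recomputes four generator sums over the whole array for every index; B computes the even- and odd-position totals once in a single pass and decides each index with O(1) arithmetic on them.
import Mathlib
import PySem

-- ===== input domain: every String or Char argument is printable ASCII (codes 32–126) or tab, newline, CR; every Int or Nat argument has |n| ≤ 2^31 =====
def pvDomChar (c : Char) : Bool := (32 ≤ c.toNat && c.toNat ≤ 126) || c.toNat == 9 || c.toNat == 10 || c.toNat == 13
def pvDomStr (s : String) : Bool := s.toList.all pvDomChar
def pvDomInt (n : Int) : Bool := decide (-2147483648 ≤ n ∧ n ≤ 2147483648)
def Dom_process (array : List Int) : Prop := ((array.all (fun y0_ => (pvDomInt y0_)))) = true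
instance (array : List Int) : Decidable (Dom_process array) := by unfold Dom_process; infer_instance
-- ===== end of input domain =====

-- B replaces A's per-index re-summation by two parity totals computed once.

-- ===== PORT A =====
-- sum(array[j] for j in range(a, b, 2))  (indices produced by these ranges are always in bounds)
def pvSum2 (l : List Int) (a b : Int) : Int :=
  ((PySem.List.pyRange a b 2).map (fun j => PySem.List.pyGetD l j 0)).sum

def process (array : List Int) : Int :=
  (PySem.List.pyRange 0 (array.length : Int) 1).foldl
    (fun result i =>
      let se :=
        if PySem.Int.mod i 2 == 0 then
          (pvSum2 array 0 i + pvSum2 array (i + 2) (array.length : Int),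
           pvSum2 array 1 i + pvSum2 array (i + 1) (array.length : Int))
        else
          (pvSum2 array 0 i + pvSum2 array (i + 1) (array.length : Int),
           pvSum2 array 1 i + pvSum2 array (i + 2) (array.length : Int))
      if se.1 == se.2 then result + 1 else result) 0

-- ===== PORT B =====
def process_alt (array : List Int) : Int :=
  let totals := (PySem.List.enumerate array 0).foldl
    (fun (p : Int × Int) ix =>
      if PySem.Int.mod ix.1 2 == 0 then (p.1 + ix.2, p.2) else (p.1, p.2 + ix.2))
    (0, 0)
  (PySem.List.enumerate array 0).foldl
    (fun result ix =>
      if (if PySem.Int.mod ix.1 2 == 0 then totals.1 - ix.2 == totals.2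
          else totals.1 == totals.2 - ix.2) then result + 1 else result)
    0

-- ===== PRECONDITION & SPEC =====
def Spec_process (array : List Int) (out : Int) : Prop := out = process_alt array
instance (array : List Int) (out : Int) : Decidable (Spec_process array out) := by unfold Spec_process; infer_instance

-- ===== CLAIM (what is proved, stated in full; the proofs are below) =====
def Claim_equal_process : Prop := ∀ (array : List Int), Dom_process array → Spec_process array (process array)

-- ===== LEMMAS AND PROOFS =====

-- sum of the elements at even positions of l
def S2 : List Int → Int
  | [] => 0
  | x :: xs => x + S2 xs.tail
termination_by l => l.length
decreasing_by simp only [List.length_tail, List.length_cons]; omega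

theorem S2_nil : S2 [] = 0 := by simp [S2]

theorem S2_cons (x : Int) (xs : List Int) : S2 (x :: xs) = x + S2 xs.tail := by simp [S2]

theorem rng2_nil (a b : Int) (h : b ≤ a) : PySem.List.pyRange a b 2 = [] := by
  rw [PySem.List.pyRange_of_pos a b (by omega)]
  simp [show ¬ a < b by omega]

theorem rng2_cons (a b : Int) (h : a < b) :
    PySem.List.pyRange a b 2 = a :: PySem.List.pyRange (a + 2) b 2 := by
  rw [PySem.List.pyRange_of_pos a b (by omega), PySem.List.pyRange_of_pos (a + 2) b (by omega)]
  have hc : (if a < b then ((b - a + 2 - 1) / 2).toNat else 0)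
      = (if a + 2 < b then ((b - (a + 2) + 2 - 1) / 2).toNat else 0) + 1 := by
    split <;> split <;> omega
  rw [hc, List.range_succ_eq_map, List.map_cons, List.map_map]
  congr 1
  · push_cast; ring
  · apply List.map_congr_left
    intro k _
    show a + 2 * ((Nat.succ k : Nat) : Int) = a + 2 + 2 * (k : Int)
    push_cast; ring

theorem rng2_succ (a b : Int) (h : ¬ (2 ∣ (b - a))) :
    PySem.List.pyRange a b 2 = PySem.List.pyRange a (b + 1) 2 := by
  rw [PySem.List.pyRange_of_pos a b (by omega), PySem.List.pyRange_of_pos a (b + 1) (by omega)]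
  have hc : (if a < b then ((b - a + 2 - 1) / 2).toNat else 0)
      = (if a < b + 1 then ((b + 1 - a + 2 - 1) / 2).toNat else 0) := by
    split <;> split <;> omega
  rw [hc]

theorem Gnil (l : List Int) (a b : Int) (h : b ≤ a) : pvSum2 l a b = 0 := by
  simp [pvSum2, rng2_nil a b h]

theorem Gcons (l : List Int) (a b : Int) (h : a < b) :
    pvSum2 l a b = PySem.List.pyGetD l a 0 + pvSum2 l (a + 2) b := by
  simp [pvSum2, rng2_cons a b h]

theorem Gsplit_aux (l : List Int) (j : Nat) : ∀ a b : Int, a + 2 * (j : Int) ≤ b →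
    pvSum2 l a b = pvSum2 l a (a + 2 * (j : Int)) + pvSum2 l (a + 2 * (j : Int)) b := by
  induction j with
  | zero => intro a b _; simp [Gnil l a a (by omega)]
  | succ j ih =>
    intro a b hb
    have h1 : a < b := by push_cast at hb ⊢; omega
    have h2 : a < a + 2 * (((j : Nat) + 1 : Nat) : Int) := by push_cast; omega
    rw [Gcons l a b h1, Gcons l a _ h2]
    have e3 : a + 2 * (((j : Nat) + 1 : Nat) : Int) = (a + 2) + 2 * (j : Int) := by push_cast; ring
    rw [e3, ih (a + 2) b (by push_cast at hb ⊢; omega)]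
    ring

theorem Gsplit (l : List Int) (a m b : Int) (h1 : a ≤ m) (h2 : m ≤ b) (h3 : 2 ∣ (m - a)) :
    pvSum2 l a b = pvSum2 l a m + pvSum2 l m b := by
  have hm : m = a + 2 * (((m - a).toNat / 2 : Nat) : Int) := by
    obtain ⟨c, hc⟩ := h3; omega
  rw [hm] at h2 ⊢
  exact Gsplit_aux l ((m - a).toNat / 2) a b h2

theorem sum2_drop (l : List Int) (k : Nat) :
    pvSum2 l (k : Int) (l.length : Int) = S2 (l.drop k) := by
  by_cases hk : k < l.length
  · rw [Gcons l (k : Int) (l.length : Int) (by exact_mod_cast hk)]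
    have e : ((k : Int) + 2) = ((k + 2 : Nat) : Int) := by push_cast; ring
    rw [e, sum2_drop l (k + 2)]
    rw [List.drop_eq_getElem_cons hk, S2_cons, List.tail_drop]
    rw [PySem.List.pyGetD_natCast l k 0, List.getD_eq_getElem l 0 hk]
  · rw [Gnil l _ _ (by exact_mod_cast Nat.le_of_not_lt hk)]
    rw [List.drop_eq_nil_of_le (Nat.le_of_not_lt hk), S2_nil]
termination_by l.length - k

-- per-index identities: A's four partial sums in terms of the two full-parity sums
theorem keyE (l : List Int) (i : Int) (h0 : 0 ≤ i) (h1 : i < (l.length : Int)) (he : 2 ∣ i) :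
    pvSum2 l 0 i + pvSum2 l (i + 2) (l.length : Int)
      = pvSum2 l 0 (l.length : Int) - PySem.List.pyGetD l i 0
    ∧ pvSum2 l 1 i + pvSum2 l (i + 1) (l.length : Int) = pvSum2 l 1 (l.length : Int) := by
  constructor
  · have hs := Gsplit l 0 i (l.length : Int) h0 (by omega) (by simpa using he)
    have hc := Gcons l i (l.length : Int) h1
    omega
  · have hs := Gsplit l 1 (i + 1) (l.length : Int) (by omega) (by omega) (by omega)
    have he2 : pvSum2 l 1 i = pvSum2 l 1 (i + 1) := by
      simp only [pvSum2]; rw [rng2_succ 1 i (by omega)]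
    omega

theorem keyO (l : List Int) (i : Int) (h0 : 0 ≤ i) (h1 : i < (l.length : Int)) (he : ¬ 2 ∣ i) :
    pvSum2 l 0 i + pvSum2 l (i + 1) (l.length : Int) = pvSum2 l 0 (l.length : Int)
    ∧ pvSum2 l 1 i + pvSum2 l (i + 2) (l.length : Int)
      = pvSum2 l 1 (l.length : Int) - PySem.List.pyGetD l i 0 := by
  have hi1 : 1 ≤ i := by omega
  constructor
  · have hs := Gsplit l 0 (i + 1) (l.length : Int) (by omega) (by omega) (by omega)
    have he2 : pvSum2 l 0 i = pvSum2 l 0 (i + 1) := by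
      simp only [pvSum2]; rw [rng2_succ 0 i (by simpa using he)]
    omega
  · have hs := Gsplit l 1 i (l.length : Int) hi1 (by omega) (by omega)
    have hc := Gcons l i (l.length : Int) h1
    omega

-- B's first loop computes the two parity totals
theorem btotals (l : List Int) : ∀ (s E O : Int), 0 ≤ s →
    (PySem.List.enumerate l s).foldl
      (fun (p : Int × Int) ix =>
        if PySem.Int.mod ix.1 2 == 0 then (p.1 + ix.2, p.2) else (p.1, p.2 + ix.2)) (E, O)
    = if PySem.Int.mod s 2 = 0 then (E + S2 l, O + S2 l.tail) else (E + S2 l.tail, O + S2 l) := by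
  induction l with
  | nil =>
    intro s E O _
    simp [PySem.List.enumerate, S2_nil]
  | cons x xs ih =>
    intro s E O hs
    rw [PySem.List.enumerate_cons]
    have hmod : PySem.Int.mod s 2 = s % 2 := PySem.Int.mod_eq_emod_of_pos (by omega)
    have hmod1 : PySem.Int.mod (s + 1) 2 = (s + 1) % 2 := PySem.Int.mod_eq_emod_of_pos (by omega)
    by_cases h : s % 2 = 0
    · have hcond : (PySem.Int.mod s 2 == 0) = true := by simp [h]
      simp only [List.foldl_cons, hcond, if_true]
      rw [ih (s + 1) (E + x) O (by omega), if_neg (by rw [hmod1]; omega),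
        if_pos (by rw [hmod]; exact h)]
      simp only [S2_cons, List.tail_cons, Prod.mk.injEq]
      exact ⟨by ring, trivial⟩
    · have hcond : (PySem.Int.mod s 2 == 0) = false := by simp; omega
      simp only [List.foldl_cons, hcond, Bool.false_eq_true, if_false]
      rw [ih (s + 1) E (O + x) (by omega), if_pos (by rw [hmod1]; omega),
        if_neg (by rw [hmod]; exact h)]
      simp only [S2_cons, List.tail_cons, Prod.mk.injEq]
      exact ⟨trivial, by ring⟩

-- counting a predicate over enumerate = counting it over the index range
theorem countE (f : Int → Int → Bool) (l : List Int) : ∀ (s : Int), 0 ≤ s →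
    (PySem.List.enumerate l s).countP (fun ix => f ix.1 ix.2)
    = (PySem.List.pyRange s (s + (l.length : Int)) 1).countP
        (fun i => f i (PySem.List.pyGetD l (i - s) 0)) := by
  induction l with
  | nil =>
    intro s _
    rw [PySem.List.pyRange_one_eq_nil (by simp)]
    simp [PySem.List.enumerate]
  | cons x xs ih =>
    intro s hs
    rw [PySem.List.enumerate_cons]
    rw [PySem.List.pyRange_one_cons (by push_cast [List.length_cons]; omega : s < s + ((x :: xs).length : Int))]
    rw [List.countP_cons, List.countP_cons]
    have hrange : s + ((x :: xs).length : Int) = (s + 1) + ((xs.length : Nat) : Int) := by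
      push_cast [List.length_cons]; ring
    rw [hrange]
    have htail : (PySem.List.pyRange (s + 1) ((s + 1) + (xs.length : Int)) 1).countP
          (fun i => f i (PySem.List.pyGetD (x :: xs) (i - s) 0))
        = (PySem.List.pyRange (s + 1) ((s + 1) + (xs.length : Int)) 1).countP
          (fun i => f i (PySem.List.pyGetD xs (i - (s + 1)) 0)) := by
      apply List.countP_congr
      intro i hi
      have hb := (PySem.List.mem_pyRange_one).mp hi
      have h1 : i - s = ((i - s).toNat : Int) := by omega
      have h2 : i - (s + 1) = (((i - s).toNat - 1 : Nat) : Int) := by omega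
      rw [h1, h2, PySem.List.pyGetD_natCast, PySem.List.pyGetD_natCast]
      have h3 : (i - s).toNat = ((i - s).toNat - 1) + 1 := by omega
      rw [h3]
      simp
    rw [htail, ih (s + 1) (by omega)]
    simp

-- ===== VERDICT (by name: the statement is the Claim_ definition above) =====
theorem process_spec : Claim_equal_process := by
  intro array _
  show process array = process_alt array
  have hE0 : pvSum2 array 0 (array.length : Int) = S2 array := by
    have h := sum2_drop array 0; simpa using h
  have hO0 : pvSum2 array 1 (array.length : Int) = S2 array.tail := by
    have h := sum2_drop array 1; simpa [List.drop_one] using h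
  simp only [process, process_alt]
  rw [btotals array 0 0 0 le_rfl, if_pos (show PySem.Int.mod 0 2 = 0 by decide)]
  simp only [zero_add]
  rw [PySem.List.foldl_congr_mem _ _
    (fun r i => if (if PySem.Int.mod i 2 == 0
        then ((S2 array - PySem.List.pyGetD array i 0) == S2 array.tail)
        else (S2 array == S2 array.tail - PySem.List.pyGetD array i 0)) then r + 1 else r) 0
    ?hcongr]
  case hcongr =>
    intro r i hi
    obtain ⟨h0, h1⟩ := PySem.List.mem_pyRange_one.mp hi
    by_cases hpar : PySem.Int.mod i 2 = 0
    · have hd : (2 : Int) ∣ i := (PySem.Int.mod_eq_zero_iff_dvd i 2).mp hpar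
      obtain ⟨k1, k2⟩ := keyE array i h0 h1 hd
      have hcond : (PySem.Int.mod i 2 == 0) = true := by simpa using hd
      simp only [hcond, if_true]
      rw [k1, k2, hE0, hO0]
    · have hd : ¬ (2 : Int) ∣ i := fun h => hpar ((PySem.Int.mod_eq_zero_iff_dvd i 2).mpr h)
      obtain ⟨k1, k2⟩ := keyO array i h0 h1 hd
      have hcond : (PySem.Int.mod i 2 == 0) = false := by simpa using hd
      simp only [hcond, Bool.false_eq_true, if_false]
      rw [k1, k2, hE0, hO0]
  rw [PySem.List.foldl_count_if, PySem.List.foldl_count_if]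
  have hc := countE (fun i x => if PySem.Int.mod i 2 == 0
        then ((S2 array - x) == S2 array.tail)
        else (S2 array == S2 array.tail - x)) array 0 le_rfl
  simp only [sub_zero, zero_add] at hc
  rw [hc]
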